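-- pv_equiv track=rewrite | github.com/nanameru/note-article-skill | note-mcp-patches/src/note_mcp/auth/browser.py | extract_session_cookies
-- ===== SOURCE A (Python) =====
-- from typing import TYPE_CHECKING, Any
--
-- REQUIRED_COOKIES = ["_note_session_v5"]
--
-- OPTIONAL_COOKIES = ["note_gql_auth_token", "XSRF-TOKEN"]
--
-- def extract_session_cookies(cookies: list[dict[str, Any]]) -> dict[str, str]:
--     """Extract required session cookies from browser cookies.
--
--     Args:
--         cookies: List of cookie dictionaries from Playwright
--
--     Returns:
--         Dictionary with required and optional cookie name-value pairs
--
--     Raises: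
--         ValueError: If required cookies are missing
--     """
--     result: dict[str, str] = {}
--
--     all_cookies = REQUIRED_COOKIES + OPTIONAL_COOKIES
--     for cookie in cookies:
--         name = cookie.get("name", "")
--         if name in all_cookies:
--             result[name] = cookie.get("value", "")
--
--     # Validate required cookies only
--     for required_cookie in REQUIRED_COOKIES:
--         if required_cookie not in result:
--             raise ValueError(f"Missing required cookie: {required_cookie}")
--
--     return result
-- ===== SOURCE B (Python) =====
-- REQUIRED_COOKIES = ["_note_session_v5"]
--
-- OPTIONAL_COOKIES = ["note_gql_auth_token", "XSRF-TOKEN"]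
--
-- def extract_session_cookies(cookies):
--     lookup = {c.get("name", ""): c.get("value", "") for c in cookies}
--     result = {name: lookup[name]
--               for name in REQUIRED_COOKIES + OPTIONAL_COOKIES
--               if name in lookup}
--     for name in REQUIRED_COOKIES:
--         if name not in result:
--             raise ValueError(f"Missing required cookie: {name}")
--     return result
-- ===== Notes on version B (the rewrite author's own statement) =====
-- stated objective: alternative
-- what changed: A scans the cookie list filtering by a membership test in the name list; B reverses the traversal: it builds one name->value index over all cookies, then iterates the fixed name list REQUIRED_COOKIES + OPTIONAL_COOKIES looking each name up in the index. Pre_ excludes inputs where both raise ValueError (no _note_session_v5 cookie) and inputs where the matched names first occur out of the fixed-list order, on which the result's dict key order is an accidental tie between scan order (A) and fixed-list order (B).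
import Mathlib
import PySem

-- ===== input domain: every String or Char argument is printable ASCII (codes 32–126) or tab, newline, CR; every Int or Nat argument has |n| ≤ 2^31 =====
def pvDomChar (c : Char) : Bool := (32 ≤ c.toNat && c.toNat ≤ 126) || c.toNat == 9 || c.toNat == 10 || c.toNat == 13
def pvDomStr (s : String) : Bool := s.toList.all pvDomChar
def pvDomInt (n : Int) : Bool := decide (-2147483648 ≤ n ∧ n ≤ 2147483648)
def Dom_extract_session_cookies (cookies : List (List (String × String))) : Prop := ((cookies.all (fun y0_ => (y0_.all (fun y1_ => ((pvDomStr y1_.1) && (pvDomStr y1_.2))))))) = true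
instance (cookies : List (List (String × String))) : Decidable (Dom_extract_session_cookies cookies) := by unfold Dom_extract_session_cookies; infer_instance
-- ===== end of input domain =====

-- B replaces A's scan-and-filter over the cookies with an index dict over all cookies followed by lookups over the fixed name list (alternative traversal); return-value equivalence only — neither mutates its argument.


-- ===== PORT A =====
def pvRequired : List String := ["_note_session_v5"]
def pvOptional : List String := ["note_gql_auth_token", "XSRF-TOKEN"]
-- cookie.get("name", "") / cookie.get("value", "") on the cookie dict (first-match lookup)
def pvName (cookie : List (String × String)) : String := (PySem.Dict.mk cookie).getD "name" ""
def pvVal (cookie : List (String × String)) : String := (PySem.Dict.mk cookie).getD "value" ""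

-- loop body of A: overwrite insert when the name is wanted
def pvStepA (result : PySem.Dict String String) (cookie : List (String × String)) : PySem.Dict String String :=
  if pvName cookie ∈ pvRequired ++ pvOptional then result.insert (pvName cookie) (pvVal cookie) else result

-- A's raise of ValueError for a missing required cookie is excluded by Pre_ below
def extract_session_cookies (cookies : List (List (String × String))) : List (String × String) :=
  (cookies.foldl pvStepA PySem.Dict.empty).items

-- ===== PORT B =====
-- B's index comprehension: lookup = {c.get("name",""): c.get("value","") for c in cookies}
def pvStepL (lookup : PySem.Dict String String) (cookie : List (String × String)) : PySem.Dict String String :=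
  lookup.insert (pvName cookie) (pvVal cookie)

-- B's result comprehension body: result[name] = lookup[name] when name in lookup
def pvStepR (lookup : PySem.Dict String String) (result : PySem.Dict String String) (name : String) : PySem.Dict String String :=
  match lookup.get? name with
  | some v => result.insert name v
  | none => result

-- B's raise of ValueError for a missing required cookie is excluded by Pre_ below
def extract_session_cookies_alt (cookies : List (List (String × String))) : List (String × String) :=
  let lookup := cookies.foldl pvStepL PySem.Dict.empty
  ((pvRequired ++ pvOptional).foldl (pvStepR lookup) PySem.Dict.empty).items

-- ===== PRECONDITION & SPEC =====
-- Pre_ excludes (a) the inputs on which both Pythons raise ValueError (no cookie named "_note_session_v5"),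
-- and (b) the inputs where the matched wanted names first occur among the cookies out of the fixed-list order:
-- there the result's key order (A: first-occurrence scan order, B: fixed-list order) is an accidental
-- dict-insertion-order tie, and either order is defensible for a cookie dictionary.
def Pre_extract_session_cookies (cookies : List (List (String × String))) : Prop :=
  (∃ cookie ∈ cookies, (PySem.Dict.mk cookie).getD "name" "" = "_note_session_v5") ∧
  PySem.Set.ofList ((cookies.map pvName).filter (fun n => decide (n ∈ pvRequired ++ pvOptional)))
    = (pvRequired ++ pvOptional).filter
        (fun n => decide (n ∈ (cookies.map pvName).filter (fun n => decide (n ∈ pvRequired ++ pvOptional))))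
instance (cookies : List (List (String × String))) : Decidable (Pre_extract_session_cookies cookies) := by unfold Pre_extract_session_cookies; infer_instance
def pvWitness_extract_session_cookies : (List (List (String × String))) :=
  [[("name", "_note_session_v5"), ("value", "abc")]]

def Spec_extract_session_cookies (cookies : List (List (String × String))) (out : List (String × String)) : Prop := out = extract_session_cookies_alt cookies
instance (cookies : List (List (String × String))) (out : List (String × String)) : Decidable (Spec_extract_session_cookies cookies out) := by unfold Spec_extract_session_cookies; infer_instance

-- ===== CLAIM (what is proved, stated in full; the proofs are below) =====
def Claim_equal_extract_session_cookies : Prop := ∀ (cookies : List (List (String × String))), Dom_extract_session_cookies cookies → Pre_extract_session_cookies cookies → Spec_extract_session_cookies cookies (extract_session_cookies cookies)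

-- ===== LEMMAS AND PROOFS =====
-- matched names in scan order, and the value of the last occurrence of a name
def pvNames (cookies : List (List (String × String))) : List String :=
  (cookies.map pvName).filter (fun n => decide (n ∈ pvRequired ++ pvOptional))
def pvLastVal (cookies : List (List (String × String))) (n : String) : String :=
  match cookies.reverse.find? (fun c => pvName c == n) with
  | some c => pvVal c
  | none => ""

theorem stepA_pos (d : PySem.Dict String String) (c : List (String × String))
    (hw : pvName c ∈ pvRequired ++ pvOptional) :
    pvStepA d c = d.insert (pvName c) (pvVal c) := if_pos hw

theorem stepA_neg (d : PySem.Dict String String) (c : List (String × String))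
    (hw : pvName c ∉ pvRequired ++ pvOptional) :
    pvStepA d c = d := if_neg hw

theorem mem_names_wanted (cs : List (List (String × String))) (n : String)
    (h : n ∈ pvNames cs) : n ∈ pvRequired ++ pvOptional := by
  have := (List.mem_filter.mp h).2
  simpa using this

theorem getDA (cs : List (List (String × String))) (d : PySem.Dict String String) (n : String) :
    (cs.foldl pvStepA d).getD n "" =
      if n ∈ pvRequired ++ pvOptional then
        (match cs.reverse.find? (fun c => pvName c == n) with
         | some c => pvVal c
         | none => d.getD n "")
      else d.getD n "" := by
  induction cs generalizing d with
  | nil => simp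
  | cons c cs ih =>
    simp only [List.foldl_cons, List.reverse_cons, List.find?_append]
    by_cases hw : pvName c ∈ pvRequired ++ pvOptional
    · rw [stepA_pos d c hw, ih]
      by_cases hW : n ∈ pvRequired ++ pvOptional
      · simp only [if_pos hW]
        cases hfind : cs.reverse.find? (fun c => pvName c == n) with
        | some x => simp
        | none =>
          by_cases hn : n = pvName c
          · subst hn; simp
          · have h2 : (pvName c == n) = false := by simp [beq_eq_decide, Ne.symm hn]
            simp [h2, PySem.Dict.getD_insert, hn]
      · have hn : ¬ n = pvName c := fun h => hW (h ▸ hw)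
        simp [hW, PySem.Dict.getD_insert, hn]
    · rw [stepA_neg d c hw, ih]
      by_cases hW : n ∈ pvRequired ++ pvOptional
      · have h2 : (pvName c == n) = false := by
          simp only [beq_eq_decide, decide_eq_false_iff_not]
          exact fun h => hw (h ▸ hW)
        simp [hW, h2]
      · simp [hW]

theorem keysA (cs : List (List (String × String))) (d : PySem.Dict String String) :
    (cs.foldl pvStepA d).keys = PySem.Set.update d.keys (pvNames cs) := by
  induction cs generalizing d with
  | nil => simp [pvNames, PySem.Set.update]
  | cons c cs ih =>
    simp only [List.foldl_cons]
    by_cases hw : pvName c ∈ pvRequired ++ pvOptional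
    · rw [stepA_pos d c hw, ih]
      have hnames : pvNames (c :: cs) = pvName c :: pvNames cs := by
        simp only [pvNames, List.map_cons, List.filter_cons, decide_eq_true hw, if_true]
      rw [hnames, PySem.Set.update_cons]
      congr 1
      by_cases hc : d.contains (pvName c) = true
      · rw [PySem.Dict.keys_insert_of_contains d _ hc]
        have hm : (pvName c) ∈ d.keys := (PySem.Dict.contains_iff_mem_keys d _).mp hc
        simp [PySem.Set.add, hm]
      · rw [PySem.Dict.keys_insert_of_not_contains d _ (by simpa using hc)]
        have hm : (pvName c) ∉ d.keys := fun h =>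
          hc ((PySem.Dict.contains_iff_mem_keys d _).mpr h)
        simp [PySem.Set.add, hm]
    · rw [stepA_neg d c hw, ih]
      have hnames : pvNames (c :: cs) = pvNames cs := by
        simp only [pvNames, List.map_cons, List.filter_cons, decide_eq_false hw, Bool.false_eq_true, if_false]
      rw [hnames]

theorem a_canon (cs : List (List (String × String))) :
    extract_session_cookies cs =
      (PySem.Set.ofList (pvNames cs)).map (fun n => (n, pvLastVal cs n)) := by
  unfold extract_session_cookies
  have hkeys : (cs.foldl pvStepA PySem.Dict.empty).keys = PySem.Set.ofList (pvNames cs) := by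
    rw [keysA, PySem.Dict.keys_empty, PySem.Set.update_nil_left]
  rw [PySem.Dict.items_eq_map_keys _ (hkeys ▸ PySem.Set.nodup_ofList _) "", hkeys]
  apply List.map_congr_left
  intro n hn
  have hw : n ∈ pvRequired ++ pvOptional :=
    mem_names_wanted cs n ((PySem.Set.mem_ofList _ _).mp hn)
  rw [getDA, if_pos hw]
  unfold pvLastVal
  cases cs.reverse.find? (fun c => pvName c == n) with
  | some c => rfl
  | none => simp

-- B's index: lookup.get? n is the value of the last cookie named n
theorem get?L (cs : List (List (String × String))) (d : PySem.Dict String String) (n : String) :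
    (cs.foldl pvStepL d).get? n =
      (match cs.reverse.find? (fun c => pvName c == n) with
       | some c => some (pvVal c)
       | none => d.get? n) := by
  induction cs generalizing d with
  | nil => simp
  | cons c cs ih =>
    simp only [List.foldl_cons, List.reverse_cons, List.find?_append]
    rw [show pvStepL d c = d.insert (pvName c) (pvVal c) from rfl, ih]
    cases hfind : cs.reverse.find? (fun c => pvName c == n) with
    | some x => simp
    | none =>
      by_cases hn : n = pvName c
      · subst hn; simp
      · have h2 : (pvName c == n) = false := by simp [beq_eq_decide, Ne.symm hn]
        simp [h2, PySem.Dict.get?_insert, hn]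

-- B's result loop over fresh distinct names appends the present ones
theorem itemsR (lookup : PySem.Dict String String) (names : List String) (d : PySem.Dict String String)
    (hnd : d.keys.Nodup) (hfresh : ∀ n ∈ names, d.contains n = false) (hnodup : names.Nodup) :
    (names.foldl (pvStepR lookup) d).items =
      d.items ++ (names.filter (fun n => lookup.contains n)).map (fun n => (n, lookup.getD n "")) := by
  induction names generalizing d with
  | nil => simp
  | cons n names ih =>
    simp only [List.foldl_cons, List.filter_cons]
    cases hget : lookup.get? n with
    | none =>
      have hc : lookup.contains n = false := by
        rw [PySem.Dict.contains_eq_isSome_get?, hget]; rfl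
      rw [show pvStepR lookup d n = d from by unfold pvStepR; rw [hget]]
      rw [ih d hnd (fun m hm => hfresh m (List.mem_cons_of_mem _ hm)) hnodup.of_cons]
      simp [hc]
    | some v =>
      have hc : lookup.contains n = true := by
        rw [PySem.Dict.contains_eq_isSome_get?, hget]; rfl
      have hdc : d.contains n = false := hfresh n (by simp)
      rw [show pvStepR lookup d n = d.insert n v from by unfold pvStepR; rw [hget]]
      have hfresh' : ∀ m ∈ names, (d.insert n v).contains m = false := by
        intro m hm
        rw [PySem.Dict.contains_insert]
        have hne : m ≠ n := fun h => (List.nodup_cons.mp hnodup).1 (h ▸ hm)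
        simp [beq_eq_decide, hne, hfresh m (List.mem_cons_of_mem _ hm)]
      have hnd' : (d.insert n v).keys.Nodup := PySem.Dict.nodup_keys_insert _ _ _ hnd
      rw [ih (d.insert n v) hnd' hfresh' hnodup.of_cons]
      rw [PySem.Dict.items_insert_of_not_contains _ _ hdc]
      have hgd : lookup.getD n "" = v := PySem.Dict.getD_of_get?_eq_some _ _ hget
      simp [hc, hgd]

theorem b_canon (cs : List (List (String × String))) :
    extract_session_cookies_alt cs =
      ((pvRequired ++ pvOptional).filter (fun n => decide (n ∈ pvNames cs))).map
        (fun n => (n, pvLastVal cs n)) := by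
  unfold extract_session_cookies_alt
  have hnodup : (pvRequired ++ pvOptional).Nodup := by decide
  rw [itemsR _ _ PySem.Dict.empty (by simp) (fun n _ => PySem.Dict.contains_empty n) hnodup]
  rw [show (PySem.Dict.empty : PySem.Dict String String).items = [] from rfl, List.nil_append]
  have hfc : ∀ n ∈ pvRequired ++ pvOptional,
      (cs.foldl pvStepL PySem.Dict.empty).contains n = decide (n ∈ pvNames cs) := by
    intro n hw
    rw [PySem.Dict.contains_eq_isSome_get?, get?L]
    cases hfind : cs.reverse.find? (fun c => pvName c == n) with
    | some c =>
      have hm : c ∈ cs := by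
        have := List.mem_of_find?_eq_some hfind
        simpa using this
      have hname : pvName c = n := by
        have := List.find?_some hfind
        simpa [beq_eq_decide] using this
      have : n ∈ pvNames cs := by
        unfold pvNames
        refine List.mem_filter.mpr ⟨?_, by simpa using hw⟩
        exact hname ▸ List.mem_map_of_mem hm
      simp [this]
    | none =>
      have hnone : ∀ c ∈ cs, pvName c ≠ n := by
        intro c hc h
        have := List.find?_eq_none.mp hfind c (by simpa using hc)
        simp [h] at this
      have : n ∉ pvNames cs := by
        intro hmem
        obtain ⟨hmap, _⟩ := List.mem_filter.mp hmem
        obtain ⟨c, hc, hname⟩ := List.mem_map.mp hmap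
        exact hnone c hc hname
      simp [this]
  rw [List.filter_congr hfc]
  apply List.map_congr_left
  intro n hn
  have hmem : n ∈ pvNames cs := by simpa using (List.mem_filter.mp hn).2
  congr 1
  rw [PySem.Dict.getD_eq_get?_getD, get?L]
  unfold pvLastVal
  cases hfind : cs.reverse.find? (fun c => pvName c == n) with
  | some c => rfl
  | none =>
    exfalso
    obtain ⟨hmap, _⟩ := List.mem_filter.mp hmem
    obtain ⟨c, hc, hname⟩ := List.mem_map.mp hmap
    have := List.find?_eq_none.mp hfind c (by simpa using hc)
    simp [hname] at this

-- ===== VERDICT (by name: the statement is the Claim_ definition above) =====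
theorem extract_session_cookies_spec : Claim_equal_extract_session_cookies := by
  intro cookies _ hpre
  unfold Spec_extract_session_cookies
  rw [a_canon, b_canon]
  have horder := hpre.2
  rw [show PySem.Set.ofList (pvNames cookies)
        = (pvRequired ++ pvOptional).filter (fun n => decide (n ∈ pvNames cookies)) from horder]
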